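-- pv_equiv track=rewrite | github.com/FancyLivin/AdventOfCodeChallenges | 2023/day_9/main.py | get_prev_value_prediction
-- ===== SOURCE A (Python) =====
-- def get_prev_value_prediction(pyramid) -> int:
--     curr_val = 0
--     prev_val = 0
--     prediction = 0
--
--     for index in range(len(pyramid)-1, -1, -1):
--         curr_val = pyramid[index][0]
--         prediction = curr_val - prev_val
--         prev_val = prediction
--     return prediction
-- ===== SOURCE B (Python) =====
-- def get_prev_value_prediction(pyramid) -> int:
--     total = 0
--     for i, row in enumerate(pyramid):
--         total += (-1) ** i * row[0]
--     return total
-- ===== Notes on version B (the rewrite author's own statement) =====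
-- stated objective: simpler
-- what changed: Replaces the bottom-to-top subtractive recurrence over a reversed index range with a single forward enumerate pass accumulating (-1)**i * row[0] (the closed alternating-sum form).
import Mathlib
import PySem

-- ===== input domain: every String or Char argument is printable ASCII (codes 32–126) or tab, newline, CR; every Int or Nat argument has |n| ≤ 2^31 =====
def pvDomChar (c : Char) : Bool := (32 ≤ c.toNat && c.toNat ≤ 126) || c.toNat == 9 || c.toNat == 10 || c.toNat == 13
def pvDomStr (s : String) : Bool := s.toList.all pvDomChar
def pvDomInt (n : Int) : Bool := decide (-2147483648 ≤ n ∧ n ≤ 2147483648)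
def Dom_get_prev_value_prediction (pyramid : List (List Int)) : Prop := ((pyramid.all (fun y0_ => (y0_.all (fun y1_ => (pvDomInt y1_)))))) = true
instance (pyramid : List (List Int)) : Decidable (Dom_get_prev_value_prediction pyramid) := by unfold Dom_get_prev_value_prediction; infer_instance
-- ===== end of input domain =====

-- B replaces A's bottom-to-top subtractive recurrence with a single forward pass
-- accumulating (-1)^i * row[0] (objective: simpler).

-- ===== PORT A =====
-- state is (prev_val, prediction); curr_val is recomputed each step and not carried.
-- pyramid[index][0] is ported with pyGetD; exact inside Pre_ (index in range, row nonempty).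
def get_prev_value_prediction (pyramid : List (List Int)) : Int :=
  ((PySem.List.pyRange ((pyramid.length : Int) - 1) (-1) (-1)).foldl
    (fun (st : Int × Int) index =>
      let curr_val := PySem.List.pyGetD (PySem.List.pyGetD pyramid index []) 0 0
      let prediction := curr_val - st.1
      (prediction, prediction))
    (0, 0)).2

-- ===== PORT B =====
def get_prev_value_prediction_alt (pyramid : List (List Int)) : Int :=
  (PySem.List.enumerate pyramid 0).foldl
    (fun total p => total + (-1 : Int) ^ p.1.toNat * PySem.List.pyGetD p.2 0 0) 0

-- ===== PRECONDITION & SPEC =====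
-- Pre_ excludes exactly the inputs where Python A raises IndexError: a pyramid with an
-- empty row (pyramid[index][0] fails there). B raises on the same inputs.
def Pre_get_prev_value_prediction (pyramid : List (List Int)) : Prop :=
  ∀ row ∈ pyramid, row ≠ []
instance (pyramid : List (List Int)) : Decidable (Pre_get_prev_value_prediction pyramid) := by
  unfold Pre_get_prev_value_prediction; infer_instance
def pvWitness_get_prev_value_prediction : List (List Int) := [[0, 3, 6], [3, 3], [0]]

def Spec_get_prev_value_prediction (pyramid : List (List Int)) (out : Int) : Prop := out = get_prev_value_prediction_alt pyramid
instance (pyramid : List (List Int)) (out : Int) : Decidable (Spec_get_prev_value_prediction pyramid out) := by unfold Spec_get_prev_value_prediction; infer_instance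

-- ===== CLAIM (what is proved, stated in full; the proofs are below) =====
def Claim_equal_get_prev_value_prediction : Prop := ∀ (pyramid : List (List Int)), Dom_get_prev_value_prediction pyramid → Pre_get_prev_value_prediction pyramid → Spec_get_prev_value_prediction pyramid (get_prev_value_prediction pyramid)

-- ===== LEMMAS AND PROOFS =====

-- the common value: alternating sum of the rows' first elements, head-first
def pvAltSum : List Int → Int
  | [] => 0
  | c :: vs => c - pvAltSum vs

-- A's reversed-range fold is a foldr over the rows, which computes pvAltSum
theorem pv_foldr_eq_altSum (pyr : List (List Int)) :
    pyr.foldr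
      (fun row (st : Int × Int) =>
        (PySem.List.pyGetD row 0 0 - st.1, PySem.List.pyGetD row 0 0 - st.1))
      ((0 : Int), (0 : Int))
      = (pvAltSum (pyr.map (fun row => PySem.List.pyGetD row 0 0)),
         pvAltSum (pyr.map (fun row => PySem.List.pyGetD row 0 0))) := by
  induction pyr with
  | nil => simp [pvAltSum]
  | cons r rs ih => simp [pvAltSum, ih]

theorem pv_A_eq_altSum (pyramid : List (List Int)) :
    get_prev_value_prediction pyramid
      = pvAltSum (pyramid.map (fun row => PySem.List.pyGetD row 0 0)) := by
  unfold get_prev_value_prediction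
  have h1 : PySem.List.pyRange ((pyramid.length : Int) - 1) (-1) (-1)
      = (PySem.List.pyRange 0 (pyramid.length : Int) 1).reverse := by
    rw [PySem.List.pyRange_neg_one_eq_reverse]; norm_num
  rw [h1, List.foldl_reverse]
  have h2 : (PySem.List.pyRange 0 (pyramid.length : Int) 1).foldr
      (fun index (st : Int × Int) =>
        (PySem.List.pyGetD (PySem.List.pyGetD pyramid index []) 0 0 - st.1,
         PySem.List.pyGetD (PySem.List.pyGetD pyramid index []) 0 0 - st.1))
      ((0 : Int), (0 : Int))
      = ((PySem.List.pyRange 0 (pyramid.length : Int) 1).map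
          (fun index => PySem.List.pyGetD pyramid index [])).foldr
        (fun row (st : Int × Int) =>
          (PySem.List.pyGetD row 0 0 - st.1, PySem.List.pyGetD row 0 0 - st.1))
        ((0 : Int), (0 : Int)) := by
    rw [List.foldr_map]
  rw [h2, PySem.List.map_pyGetD_pyRange_zero', pv_foldr_eq_altSum]

-- B's forward signed pass, generalized over the start index and accumulator
theorem pv_B_loop (pyr : List (List Int)) : ∀ (s : Nat) (acc : Int),
    (PySem.List.enumerate pyr (s : Int)).foldl
      (fun total p => total + (-1 : Int) ^ p.1.toNat * PySem.List.pyGetD p.2 0 0) acc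
      = acc + (-1 : Int) ^ s * pvAltSum (pyr.map (fun row => PySem.List.pyGetD row 0 0)) := by
  induction pyr with
  | nil => intro s acc; simp [PySem.List.enumerate_nil, pvAltSum]
  | cons r rs ih =>
      intro s acc
      rw [PySem.List.enumerate_cons]
      have hs : (s : Int) + 1 = ((s + 1 : Nat) : Int) := by push_cast; ring
      simp only [List.foldl_cons, hs, ih (s + 1), pvAltSum, Int.toNat_natCast,
        List.map_cons, pow_succ]
      ring

-- ===== VERDICT (by name: the statement is the Claim_ definition above) =====
theorem get_prev_value_prediction_spec : Claim_equal_get_prev_value_prediction := by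
  intro pyramid _ _
  unfold Spec_get_prev_value_prediction
  rw [pv_A_eq_altSum]
  unfold get_prev_value_prediction_alt
  have := pv_B_loop pyramid 0 0
  simp only [Nat.cast_zero] at this
  rw [this]; ring
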